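-- pv_equiv track=rewrite | github.com/yebeike/NeSy-Edge | experiments/thesis_rebuild_20260315/rq34/scripts/build_rq3_small_v2_benchmark_20260318.py | _stabilize_hadoop_isolate_context
-- ===== SOURCE A (Python) =====
-- from typing import Dict, Iterable, List, Mapping, MutableMapping, Sequence, Tuple
--
-- def _compact_lines(lines: Sequence[str], max_chars: int) -> str:
--     kept: List[str] = []
--     total_chars = 0
--     for line in lines:
--         text = str(line or "").strip()
--         if not text or text in kept:
--             continue
--         extra = len(text) + (1 if kept else 0)
--         if kept and total_chars + extra > max_chars:
--             break
--         kept.append(text)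
--         total_chars += extra
--     return "\n".join(kept)
--
-- def _stabilize_hadoop_isolate_context(noisy_alert: str, noisy_context: str, clean_context: str, max_chars: int) -> str:
--     lower_noisy = str(noisy_context or "").lower()
--     retry_hits = sum(
--         lower_noisy.count(token)
--         for token in ("retrying connect to server", "retrying rpc toward node", "retrying worker-node connection to server")
--     )
--     has_policy = "nodeblacklistingenabled" in lower_noisy
--     if retry_hits >= 2 or has_policy:
--         return _ensure_context_contains_alert(noisy_alert, noisy_context, max_chars)
--
--     chosen: List[str] = [str(noisy_alert or "").strip()]
--     for line in str(clean_context or "").splitlines():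
--         text = str(line or "").strip()
--         lower = text.lower()
--         if not text or text in chosen:
--             continue
--         if "nodeblacklistingenabled" in lower:
--             chosen.append(text)
--             break
--     for line in str(clean_context or "").splitlines():
--         text = str(line or "").strip()
--         lower = text.lower()
--         if not text or text in chosen:
--             continue
--         if any(
--             token in lower
--             for token in ("retrying connect to server", "retrying rpc toward node", "worker-node connection to server")
--         ):
--             chosen.append(text)
--             break
--     return _compact_lines(chosen, max_chars)
--
-- def _ensure_context_contains_alert(selected_alert: str, context_text: str, max_chars: int) -> str:
--     alert = str(selected_alert or "").strip()
--     context = str(context_text or "").strip()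
--     if not alert:
--         return context
--     if alert in context:
--         return context
--     merged = f"{alert}\n{context}" if context else alert
--     return merged[:max_chars]
-- ===== SOURCE B (Python) =====
-- # B: one pass over clean_context lines records the first blacklist line and the
-- # first distinct retry line, replacing A's two sequential scans (objective: simpler).
-- from typing import List, Sequence
--
--
-- def _compact_lines(lines: Sequence[str], max_chars: int) -> str:
--     kept: List[str] = []
--     total_chars = 0
--     for line in lines:
--         text = str(line or "").strip()
--         if not text or text in kept:
--             continue
--         extra = len(text) + (1 if kept else 0)
--         if kept and total_chars + extra > max_chars:
--             break
--         kept.append(text)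
--         total_chars += extra
--     return "\n".join(kept)
--
--
-- def _ensure_context_contains_alert(selected_alert: str, context_text: str, max_chars: int) -> str:
--     alert = str(selected_alert or "").strip()
--     context = str(context_text or "").strip()
--     if not alert:
--         return context
--     if alert in context:
--         return context
--     merged = f"{alert}\n{context}" if context else alert
--     return merged[:max_chars]
--
--
-- _RETRY_TOKENS = ("retrying connect to server", "retrying rpc toward node", "worker-node connection to server")
--
--
-- def _stabilize_hadoop_isolate_context(noisy_alert: str, noisy_context: str, clean_context: str, max_chars: int) -> str:
--     lower_noisy = str(noisy_context or "").lower()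
--     retry_hits = sum(
--         lower_noisy.count(token)
--         for token in ("retrying connect to server", "retrying rpc toward node", "retrying worker-node connection to server")
--     )
--     has_policy = "nodeblacklistingenabled" in lower_noisy
--     if retry_hits >= 2 or has_policy:
--         return _ensure_context_contains_alert(noisy_alert, noisy_context, max_chars)
--
--     alert = str(noisy_alert or "").strip()
--     blacklist_line = None
--     retry_line = None
--     for line in str(clean_context or "").splitlines():
--         text = line.strip()
--         if not text or text == alert:
--             continue
--         lower = text.lower()
--         if blacklist_line is None and "nodeblacklistingenabled" in lower:
--             blacklist_line = text
--         if retry_line is None and text != blacklist_line and any(tok in lower for tok in _RETRY_TOKENS):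
--             retry_line = text
--     chosen = [alert]
--     if blacklist_line is not None:
--         chosen.append(blacklist_line)
--     if retry_line is not None:
--         chosen.append(retry_line)
--     return _compact_lines(chosen, max_chars)
-- ===== Notes on version B (the rewrite author's own statement) =====
-- stated objective: simpler
-- what changed: A's two sequential scans over the clean_context lines (first for the blacklist line, then for a retry line not already chosen) are fused into one pass that records both candidate lines at once; the short-circuit and the helpers _compact_lines/_ensure_context_contains_alert are unchanged.
import Mathlib
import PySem

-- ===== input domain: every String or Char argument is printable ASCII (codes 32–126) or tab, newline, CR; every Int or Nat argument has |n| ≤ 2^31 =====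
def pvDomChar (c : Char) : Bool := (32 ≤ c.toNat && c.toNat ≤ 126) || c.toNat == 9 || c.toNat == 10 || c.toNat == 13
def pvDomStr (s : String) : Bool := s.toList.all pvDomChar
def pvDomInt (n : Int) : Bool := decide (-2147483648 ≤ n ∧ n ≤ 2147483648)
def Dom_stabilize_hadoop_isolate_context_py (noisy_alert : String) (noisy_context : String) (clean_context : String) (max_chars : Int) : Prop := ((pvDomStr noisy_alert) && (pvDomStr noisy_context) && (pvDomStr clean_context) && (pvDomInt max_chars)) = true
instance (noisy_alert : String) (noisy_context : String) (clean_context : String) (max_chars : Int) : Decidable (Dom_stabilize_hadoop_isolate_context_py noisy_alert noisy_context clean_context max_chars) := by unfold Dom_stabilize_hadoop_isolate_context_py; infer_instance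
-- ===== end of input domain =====

-- B replaces A's two sequential scans over the clean_context lines with ONE pass that
-- records both candidate lines (objective: simpler); the helpers _compact_lines and
-- _ensure_context_contains_alert are kept unchanged and shared by both ports.

-- ===== PORT A =====
-- shared helper: _compact_lines (its for-loop with break, as structural recursion)
def pvCompactGo (max_chars : Int) : List String → List String → Int → List String
  | [], kept, _ => kept
  | l :: ls, kept, total =>
    let text := PySem.Str.strip l
    if text = "" ∨ text ∈ kept then pvCompactGo max_chars ls kept total
    else
      let extra : Int := PySem.Str.len text + (if kept ≠ [] then 1 else 0)
      if kept ≠ [] ∧ total + extra > max_chars then kept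
      else pvCompactGo max_chars ls (kept ++ [text]) (total + extra)

def pvCompactLines (lines : List String) (max_chars : Int) : String :=
  PySem.Str.join "\n" (pvCompactGo max_chars lines [] 0)

-- shared helper: _ensure_context_contains_alert (f-string ported as "\n".join)
def pvEnsure (selected_alert : String) (context_text : String) (max_chars : Int) : String :=
  let alert := PySem.Str.strip selected_alert
  let context := PySem.Str.strip context_text
  if alert = "" then context
  else if PySem.Str.isIn alert context then context
  else
    let merged := if context ≠ "" then PySem.Str.join "\n" [alert, context] else alert
    PySem.Str.slice merged none (some max_chars)

-- "nodeblacklistingenabled" in text.lower()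
def pvIsBl (text : String) : Bool :=
  PySem.Str.isIn "nodeblacklistingenabled" (PySem.Str.lower text)

-- any(token in text.lower() for token in (...)) — the second loop's tokens
def pvIsRt (text : String) : Bool :=
  let lower := PySem.Str.lower text
  PySem.Str.isIn "retrying connect to server" lower ||
  PySem.Str.isIn "retrying rpc toward node" lower ||
  PySem.Str.isIn "worker-node connection to server" lower

-- A's first loop: append the first blacklist line, then break
def pvLoop1 : List String → List String → List String
  | [], chosen => chosen
  | l :: ls, chosen =>
    let text := PySem.Str.strip l
    if text = "" ∨ text ∈ chosen then pvLoop1 ls chosen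
    else if pvIsBl text then chosen ++ [text]
    else pvLoop1 ls chosen

-- A's second loop: append the first retry line not already chosen, then break
def pvLoop2 : List String → List String → List String
  | [], chosen => chosen
  | l :: ls, chosen =>
    let text := PySem.Str.strip l
    if text = "" ∨ text ∈ chosen then pvLoop2 ls chosen
    else if pvIsRt text then chosen ++ [text]
    else pvLoop2 ls chosen

def stabilize_hadoop_isolate_context_py (noisy_alert : String) (noisy_context : String) (clean_context : String) (max_chars : Int) : String :=
  let lower_noisy := PySem.Str.lower noisy_context
  let retry_hits : Nat :=
    PySem.Str.count lower_noisy "retrying connect to server" +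
    PySem.Str.count lower_noisy "retrying rpc toward node" +
    PySem.Str.count lower_noisy "retrying worker-node connection to server"
  let has_policy := PySem.Str.isIn "nodeblacklistingenabled" lower_noisy
  if retry_hits ≥ 2 ∨ has_policy = true then
    pvEnsure noisy_alert noisy_context max_chars
  else
    let chosen := [PySem.Str.strip noisy_alert]
    let chosen := pvLoop1 (PySem.Str.splitlines clean_context) chosen
    let chosen := pvLoop2 (PySem.Str.splitlines clean_context) chosen
    pvCompactLines chosen max_chars

-- ===== PORT B =====
-- B's single pass: state = (first blacklist line?, first distinct retry line?)
def pvScan (alert : String) : List String → Option String → Option String → Option String × Option String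
  | [], bl, rt => (bl, rt)
  | l :: ls, bl, rt =>
    let text := PySem.Str.strip l
    if text = "" ∨ text = alert then pvScan alert ls bl rt
    else
      let bl' := if bl = none ∧ pvIsBl text then some text else bl
      let rt' := if rt = none ∧ bl' ≠ some text ∧ pvIsRt text then some text else rt
      pvScan alert ls bl' rt'

def stabilize_hadoop_isolate_context_py_alt (noisy_alert : String) (noisy_context : String) (clean_context : String) (max_chars : Int) : String :=
  let lower_noisy := PySem.Str.lower noisy_context
  let retry_hits : Nat :=
    PySem.Str.count lower_noisy "retrying connect to server" +
    PySem.Str.count lower_noisy "retrying rpc toward node" +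
    PySem.Str.count lower_noisy "retrying worker-node connection to server"
  let has_policy := PySem.Str.isIn "nodeblacklistingenabled" lower_noisy
  if retry_hits ≥ 2 ∨ has_policy = true then
    pvEnsure noisy_alert noisy_context max_chars
  else
    let alert := PySem.Str.strip noisy_alert
    let st := pvScan alert (PySem.Str.splitlines clean_context) none none
    pvCompactLines ([alert] ++ st.1.toList ++ st.2.toList) max_chars

-- ===== PRECONDITION & SPEC =====
def Spec_stabilize_hadoop_isolate_context_py (noisy_alert : String) (noisy_context : String) (clean_context : String) (max_chars : Int) (out : String) : Prop := out = stabilize_hadoop_isolate_context_py_alt noisy_alert noisy_context clean_context max_chars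
instance (noisy_alert : String) (noisy_context : String) (clean_context : String) (max_chars : Int) (out : String) : Decidable (Spec_stabilize_hadoop_isolate_context_py noisy_alert noisy_context clean_context max_chars out) := by unfold Spec_stabilize_hadoop_isolate_context_py; infer_instance

-- ===== CLAIM (what is proved, stated in full; the proofs are below) =====
def Claim_equal_stabilize_hadoop_isolate_context_py : Prop := ∀ (noisy_alert : String) (noisy_context : String) (clean_context : String) (max_chars : Int), Dom_stabilize_hadoop_isolate_context_py noisy_alert noisy_context clean_context max_chars → Spec_stabilize_hadoop_isolate_context_py noisy_alert noisy_context clean_context max_chars (stabilize_hadoop_isolate_context_py noisy_alert noisy_context clean_context max_chars)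

-- ===== LEMMAS AND PROOFS =====

-- first blacklist line among ls (stripped, non-blank, ≠ alert)
def pvFB (alert : String) : List String → Option String
  | [] => none
  | l :: ls =>
    let t := PySem.Str.strip l
    if t ≠ "" ∧ t ≠ alert ∧ pvIsBl t then some t else pvFB alert ls

-- first retry line among ls (stripped, non-blank, ≠ alert, ≠ the blacklist pick b?)
def pvFR (alert : String) (b? : Option String) : List String → Option String
  | [] => none
  | l :: ls =>
    let t := PySem.Str.strip l
    if t ≠ "" ∧ t ≠ alert ∧ b? ≠ some t ∧ pvIsRt t then some t else pvFR alert b? ls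

theorem pvFB_isBl (alert : String) (ls : List String) (b : String)
    (h : pvFB alert ls = some b) : pvIsBl b = true := by
  induction ls with
  | nil => simp [pvFB] at h
  | cons l ls ih =>
    simp only [pvFB] at h
    split at h
    · rename_i hc; cases h; exact hc.2.2
    · exact ih h

theorem pvLoop1_eq (alert : String) (ls : List String) :
    pvLoop1 ls [alert] = [alert] ++ (pvFB alert ls).toList := by
  induction ls with
  | nil => simp [pvLoop1, pvFB]
  | cons l ls ih =>
    simp only [pvLoop1, pvFB, List.mem_singleton]
    by_cases h1 : PySem.Str.strip l = "" ∨ PySem.Str.strip l = alert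
    · rw [if_pos h1, ih, if_neg (fun hc => h1.elim (fun e => hc.1 e) (fun e => hc.2.1 e))]
    · rw [if_neg h1]
      rw [not_or] at h1
      by_cases h2 : pvIsBl (PySem.Str.strip l) = true
      · rw [if_pos h2, if_pos ⟨h1.1, h1.2, h2⟩]; simp
      · rw [if_neg h2, ih, if_neg (fun hc => h2 hc.2.2)]

theorem pvLoop2_eq (alert : String) (b? : Option String) (ls : List String) :
    pvLoop2 ls ([alert] ++ b?.toList) = [alert] ++ b?.toList ++ (pvFR alert b? ls).toList := by
  induction ls with
  | nil => simp [pvLoop2, pvFR]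
  | cons l ls ih =>
    have hmem : PySem.Str.strip l ∈ [alert] ++ b?.toList ↔
        (PySem.Str.strip l = alert ∨ b? = some (PySem.Str.strip l)) := by
      cases b? <;> simp [eq_comm]
    simp only [pvLoop2, pvFR]
    by_cases h1 : PySem.Str.strip l = "" ∨ PySem.Str.strip l ∈ [alert] ++ b?.toList
    · rw [if_pos h1, ih,
        if_neg (fun hc => h1.elim (fun e => hc.1 e)
          (fun m => (hmem.mp m).elim (fun e => hc.2.1 e) (fun e => hc.2.2.1 e)))]
    · rw [if_neg h1]
      rw [not_or] at h1
      have ha : PySem.Str.strip l ≠ alert := fun e => h1.2 (hmem.mpr (Or.inl e))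
      have hb : b? ≠ some (PySem.Str.strip l) := fun e => h1.2 (hmem.mpr (Or.inr e))
      by_cases h2 : pvIsRt (PySem.Str.strip l) = true
      · rw [if_pos h2, if_pos ⟨h1.1, ha, hb, h2⟩]; simp
      · rw [if_neg h2, ih, if_neg (fun hc => h2 hc.2.2.2)]

-- once both candidates are fixed, the scan changes nothing
theorem pvScan_some_some (alert : String) (ls : List String) (b r : String) :
    pvScan alert ls (some b) (some r) = (some b, some r) := by
  induction ls with
  | nil => rfl
  | cons l ls ih =>
    simp only [pvScan]
    by_cases h1 : PySem.Str.strip l = "" ∨ PySem.Str.strip l = alert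
    · rw [if_pos h1, ih]
    · rw [if_neg h1, if_neg (by simp), if_neg (by simp), ih]

-- with the retry pick fixed, the scan still finds the first blacklist line
theorem pvScan_none_rt (alert : String) (ls : List String) (r : String) :
    pvScan alert ls none (some r) = (pvFB alert ls, some r) := by
  induction ls with
  | nil => rfl
  | cons l ls ih =>
    have hskip : ∀ (h : ¬(PySem.Str.strip l ≠ "" ∧ PySem.Str.strip l ≠ alert ∧ pvIsBl (PySem.Str.strip l) = true)),
        pvFB alert (l :: ls) = pvFB alert ls := fun h => by simp only [pvFB]; exact if_neg h
    simp only [pvScan]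
    by_cases h1 : PySem.Str.strip l = "" ∨ PySem.Str.strip l = alert
    · rw [if_pos h1, ih, hskip (fun hc => h1.elim (fun e => hc.1 e) (fun e => hc.2.1 e))]
    · rw [if_neg h1]
      rw [not_or] at h1
      by_cases h2 : pvIsBl (PySem.Str.strip l) = true
      · rw [if_pos (by simp [h2]), if_neg (by simp), pvScan_some_some]
        simp only [pvFB]
        rw [if_pos ⟨h1.1, h1.2, h2⟩]
      · rw [if_neg (by simp [h2]), if_neg (by simp), ih, hskip (fun hc => h2 hc.2.2)]

-- with the blacklist pick fixed, the scan finds the first distinct retry line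
theorem pvScan_bl_some (alert : String) (ls : List String) (b : String) :
    pvScan alert ls (some b) none = (some b, pvFR alert (some b) ls) := by
  induction ls with
  | nil => rfl
  | cons l ls ih =>
    simp only [pvScan, pvFR]
    by_cases h1 : PySem.Str.strip l = "" ∨ PySem.Str.strip l = alert
    · rw [if_pos h1, ih, if_neg (fun hc => h1.elim (fun e => hc.1 e) (fun e => hc.2.1 e))]
    · rw [if_neg h1]
      rw [not_or] at h1
      rw [if_neg (by simp)]
      by_cases h2 : b = PySem.Str.strip l
      · rw [if_neg (by simp [h2]), ih, if_neg (by simp [h2])]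
      · by_cases h3 : pvIsRt (PySem.Str.strip l) = true
        · rw [if_pos (by simp [h2, h3]), pvScan_some_some,
            if_pos ⟨h1.1, h1.2, fun e => h2 (Option.some.inj e), h3⟩]
        · rw [if_neg (by simp [h3]), ih, if_neg (fun hc => h3 hc.2.2.2)]

-- the key invariant: B's single pass computes A's two picks
theorem pvScan_main (alert : String) (ls : List String) :
    pvScan alert ls none none = (pvFB alert ls, pvFR alert (pvFB alert ls) ls) := by
  induction ls with
  | nil => rfl
  | cons l ls ih =>
    have hskipB : ∀ (h : ¬(PySem.Str.strip l ≠ "" ∧ PySem.Str.strip l ≠ alert ∧ pvIsBl (PySem.Str.strip l) = true)),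
        pvFB alert (l :: ls) = pvFB alert ls := fun h => by simp only [pvFB]; exact if_neg h
    have hskipR : ∀ (b? : Option String)
        (h : ¬(PySem.Str.strip l ≠ "" ∧ PySem.Str.strip l ≠ alert ∧ b? ≠ some (PySem.Str.strip l) ∧ pvIsRt (PySem.Str.strip l) = true)),
        pvFR alert b? (l :: ls) = pvFR alert b? ls := fun b? h => by simp only [pvFR]; exact if_neg h
    simp only [pvScan]
    by_cases h1 : PySem.Str.strip l = "" ∨ PySem.Str.strip l = alert
    · rw [if_pos h1, ih, hskipB (fun hc => h1.elim (fun e => hc.1 e) (fun e => hc.2.1 e)),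
        hskipR _ (fun hc => h1.elim (fun e => hc.1 e) (fun e => hc.2.1 e))]
    · rw [if_neg h1]
      rw [not_or] at h1
      by_cases h2 : pvIsBl (PySem.Str.strip l) = true
      · -- this line is the blacklist pick; the retry check skips it
        have hfb : pvFB alert (l :: ls) = some (PySem.Str.strip l) := by
          simp only [pvFB]; exact if_pos ⟨h1.1, h1.2, h2⟩
        rw [if_pos (by simp [h2]), if_neg (by simp), pvScan_bl_some, hfb,
          hskipR _ (fun hc => hc.2.2.1 rfl)]
      · have hfb : pvFB alert (l :: ls) = pvFB alert ls := hskipB (fun hc => h2 hc.2.2)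
        rw [if_neg (by simp [h2]), hfb]
        by_cases h3 : pvIsRt (PySem.Str.strip l) = true
        · -- the retry pick cannot equal the (later-found) blacklist pick: that one
          -- contains the blacklist token while this line does not
          have hb : pvFB alert ls ≠ some (PySem.Str.strip l) :=
            fun hc => h2 (pvFB_isBl alert ls _ hc)
          rw [if_pos (by simp [h3]), pvScan_none_rt]
          simp only [pvFR]
          rw [if_pos ⟨h1.1, h1.2, hb, h3⟩]
        · rw [if_neg (by simp [h3]), ih, hskipR _ (fun hc => h3 hc.2.2.2)]

-- ===== VERDICT (by name: the statement is the Claim_ definition above) =====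
theorem stabilize_hadoop_isolate_context_py_spec : Claim_equal_stabilize_hadoop_isolate_context_py := by
  intro noisy_alert noisy_context clean_context max_chars _
  unfold Spec_stabilize_hadoop_isolate_context_py
  simp only [stabilize_hadoop_isolate_context_py, stabilize_hadoop_isolate_context_py_alt]
  split_ifs with h
  · rfl
  · rw [pvScan_main, pvLoop1_eq, pvLoop2_eq]
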